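-- pv_equiv track=rewrite | github.com/parkcoool/Algorithm | 프로그래머스/3/42895. N으로 표현/N으로 표현.py | solution
-- ===== SOURCE A (Python) =====
-- def solution(N, number):
--     if N == number: return 1
--
--     # dp[i]: N을 i번 썼을 때 만들 수 있는 수의 집합
--     dp = [set() for _ in range(9)]
--     for i in range(1, 9):
--         dp[i].add(int(str(N) * i))
--
--     for ans in range(2, 9):
--         new_nums = set()
--
--         for i in range(1, ans):
--             j = ans - i
--             for num1 in dp[i]:
--                 for num2 in dp[j]:
--                     new_nums.add(num1 + num2)
--                     new_nums.add(num1 - num2)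
--                     new_nums.add(num1 * num2)
--                     if num2 != 0: new_nums.add(num1 // num2)
--
--         dp[ans].update(new_nums)
--         if number in dp[ans]: return ans
--
--     return -1
-- ===== SOURCE B (Python) =====
-- def solution(N, number):
--     if N == number:
--         return 1
--
--     def levels(c):
--         # list of the value-sets for 1..c copies of N, built by structural recursion
--         if c == 0:
--             return []
--         tbl = levels(c - 1)
--         vals = {int(str(N) * c)}
--         for i in range(1, c):
--             a, b = tbl[i - 1], tbl[c - i - 1]
--             vals |= {x + y for x in a for y in b}
--             vals |= {x - y for x in a for y in b}
--             vals |= {x * y for x in a for y in b}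
--             vals |= {x // y for x in a for y in b if y != 0}
--         tbl.append(vals)
--         return tbl
--
--     tbl = levels(8)
--     for c in range(2, 9):
--         if number in tbl[c - 1]:
--             return c
--     return -1
-- ===== Notes on version B (the rewrite author's own statement) =====
-- stated objective: alternative
-- what changed: Replaces the in-place dp array with early exit and element-wise set.add inner loops by a pure structural recursion levels(c) that returns the list of value-sets for 1..c copies (per-operation set-comprehension unions instead of a new_nums buffer of individual adds), followed by a separate scan of the finished table for the first count containing the target.
import Mathlib
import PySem

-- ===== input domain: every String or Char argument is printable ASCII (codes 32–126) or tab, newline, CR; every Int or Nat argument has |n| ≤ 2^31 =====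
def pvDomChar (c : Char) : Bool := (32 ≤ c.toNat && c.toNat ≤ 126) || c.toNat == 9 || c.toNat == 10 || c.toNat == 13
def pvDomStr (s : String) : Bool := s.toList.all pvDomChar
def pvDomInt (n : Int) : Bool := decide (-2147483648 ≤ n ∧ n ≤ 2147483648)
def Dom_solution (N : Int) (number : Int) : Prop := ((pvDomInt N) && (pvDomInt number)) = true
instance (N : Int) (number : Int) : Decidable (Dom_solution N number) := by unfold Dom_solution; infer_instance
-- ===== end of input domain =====

-- B replaces A's in-place dp array with early exit and element-wise inner adds by a pure
-- structural recursion building the list of per-count value-sets (per-operation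
-- comprehension unions), then a separate scan for the first count containing the target
-- (objective: alternative decomposition, no speed claim).

-- int(str(N) * i)  (shared by both Pythons verbatim; total form: the ValueError cases
-- — negative N with i ≥ 2 — are excluded by Pre_solution)
def repNum (N : Int) (i : Int) : Int :=
  (PySem.Int.ofChars? (PySem.List.pyRepeat (PySem.Int.toChars N) i)).getD 0

-- exact model of a Python set of ints, used by both ports: `l` holds the distinct
-- elements, `t` indexes them for O(log n) membership (neither program observes a
-- set's iteration order, so `l`'s order is irrelevant; membership is Python-exact)
structure PvSet where
  l : List Int
  t : Std.TreeSet Int compare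
  inv : ∀ x : Int, x ∈ t ↔ x ∈ l

def PvSet.empty : PvSet := ⟨[], Std.TreeSet.empty, by simp⟩

def PvSet.contains (s : PvSet) (x : Int) : Bool := s.t.contains x

def PvSet.add (s : PvSet) (x : Int) : PvSet :=
  if s.t.contains x then s else
    ⟨x :: s.l, s.t.insert x, by
      intro y
      rw [Std.TreeSet.mem_insert, s.inv y, List.mem_cons]
      constructor
      · rintro (h | h)
        · exact Or.inl (Int.compare_eq_eq.mp h).symm
        · exact Or.inr h
      · rintro (rfl | h)
        · exact Or.inl (Int.compare_eq_eq.mpr rfl)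
        · exact Or.inr h⟩

-- s.update(xs) / s |= {…}: fold the iterable's elements in
def PvSet.update (s : PvSet) (xs : List Int) : PvSet := xs.foldl PvSet.add s

-- ===== PORT A =====
-- the four 'new_nums.add(...)' statements of A's innermost loop body
def pvOps (s : PvSet) (n1 n2 : Int) : PvSet :=
  let s := PvSet.add s (n1 + n2)
  let s := PvSet.add s (n1 - n2)
  let s := PvSet.add s (n1 * n2)
  if n2 ≠ 0 then PvSet.add s (PySem.Int.floordiv n1 n2) else s

-- 'new_nums = set(); for i in range(1, ans): for num1 in dp[i]: for num2 in dp[ans-i]: …'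
def pvNew (dp : List PvSet) (ans : Int) : PvSet :=
  (PySem.List.pyRange 1 ans 1).foldl (fun s i =>
    (PySem.List.pyGetD dp i PvSet.empty).l.foldl (fun s n1 =>
      (PySem.List.pyGetD dp (ans - i) PvSet.empty).l.foldl (fun s n2 => pvOps s n1 n2) s) s)
    PvSet.empty

-- 'for ans in range(2, 9): … if number in dp[ans]: return ans' with the trailing 'return -1'
def pvAnsLoop (number : Int) : List Int → List PvSet → Int
  | [], _ => -1
  | ans :: rest, dp =>
    let new_nums := pvNew dp ans
    let dp' := PySem.List.pySetD dp ans
      (PvSet.update (PySem.List.pyGetD dp ans PvSet.empty) new_nums.l)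
    if PvSet.contains (PySem.List.pyGetD dp' ans PvSet.empty) number then ans
    else pvAnsLoop number rest dp'

def solution (N : Int) (number : Int) : Int :=
  if N == number then 1
  else
    let dp : List PvSet := (PySem.List.pyRange 0 9 1).map (fun _ => PvSet.empty)
    let dp := (PySem.List.pyRange 1 9 1).foldl (fun dp i =>
        PySem.List.pySetD dp i
          (PvSet.add (PySem.List.pyGetD dp i PvSet.empty) (repNum N i))) dp
    pvAnsLoop number (PySem.List.pyRange 2 9 1) dp

-- ===== PORT B =====
-- levels(c): the list of value-sets for 1..c copies of N, built by structural recursion;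
-- each level is the repdigit plus per-operation comprehension unions over the splits
def pvLevels (N : Int) : Nat → List PvSet
  | 0 => []
  | c+1 =>
    let tbl := pvLevels N c
    let count : Int := (c : Int) + 1
    let vals := (PySem.List.pyRange 1 count 1).foldl
      (fun vals i =>
        let a := PySem.List.pyGetD tbl (i - 1) PvSet.empty
        let b := PySem.List.pyGetD tbl (count - i - 1) PvSet.empty
        let vals := PvSet.update vals (a.l.flatMap fun x => b.l.map (fun y => x + y))
        let vals := PvSet.update vals (a.l.flatMap fun x => b.l.map (fun y => x - y))
        let vals := PvSet.update vals (a.l.flatMap fun x => b.l.map (fun y => x * y))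
        PvSet.update vals
          (a.l.flatMap fun x =>
            (b.l.filter (fun y => y != 0)).map (fun y => PySem.Int.floordiv x y)))
      (PvSet.add PvSet.empty (repNum N count))
    tbl ++ [vals]

-- 'for c in range(2, 9): if number in tbl[c-1]: return c' with the trailing 'return -1'
def pvScan (number : Int) (tbl : List PvSet) : List Int → Int
  | [] => -1
  | c :: rest =>
    if PvSet.contains (PySem.List.pyGetD tbl (c - 1) PvSet.empty) number then c
    else pvScan number tbl rest

def solution_alt (N : Int) (number : Int) : Int :=
  if N == number then 1
  else pvScan number (pvLevels N 8) (PySem.List.pyRange 2 9 1)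

-- ===== PRECONDITION & SPEC =====
-- Pre_ excludes exactly the inputs where Python A raises: for N < 0 with number ≠ N,
-- int(str(N)*i) at i = 2 is a ValueError (e.g. int('-2-2')); B raises there too.
def Pre_solution (N : Int) (number : Int) : Prop := N = number ∨ 0 ≤ N
instance (N : Int) (number : Int) : Decidable (Pre_solution N number) := by
  unfold Pre_solution; infer_instance

def pvWitness_solution : Int × Int := (5, 12)

def Spec_solution (N : Int) (number : Int) (out : Int) : Prop := out = solution_alt N number
instance (N : Int) (number : Int) (out : Int) : Decidable (Spec_solution N number out) := by
  unfold Spec_solution; infer_instance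

-- ===== CLAIM (what is proved, stated in full; the proofs are below) =====
def Claim_equal_solution : Prop := ∀ (N : Int) (number : Int), Dom_solution N number →
  Pre_solution N number → Spec_solution N number (solution N number)

-- ===== LEMMAS AND PROOFS =====

theorem PvSet.mem_add (s : PvSet) (x y : Int) : y ∈ (PvSet.add s x).l ↔ y ∈ s.l ∨ y = x := by
  unfold PvSet.add
  split_ifs with h
  · have hx : x ∈ s.l := by
      rw [← s.inv x]
      exact (Std.TreeSet.contains_iff_mem ..).mp h
    constructor
    · exact Or.inl
    · rintro (h1 | rfl) <;> assumption
  · simp [eq_comm, or_comm]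

theorem PvSet.contains_iff (s : PvSet) (x : Int) : PvSet.contains s x = true ↔ x ∈ s.l := by
  rw [PvSet.contains, Std.TreeSet.contains_iff_mem, s.inv]

theorem PvSet.mem_empty (x : Int) : x ∈ PvSet.empty.l ↔ False := by
  simp [PvSet.empty]

theorem PvSet.mem_update (s : PvSet) (xs : List Int) (y : Int) :
    y ∈ (PvSet.update s xs).l ↔ y ∈ s.l ∨ y ∈ xs := by
  rw [PvSet.update]
  induction xs generalizing s with
  | nil => simp
  | cons x t ih =>
    rw [List.foldl_cons, ih, PvSet.mem_add]
    simp only [List.mem_cons]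
    tauto

-- the value x is producible from exactly c copies of N (the recurrence both programs share)
inductive Reach (N : Int) : Nat → Int → Prop
  | rep (c : Nat) : 1 ≤ c → Reach N c (repNum N (c : Int))
  | add {i j : Nat} {x y : Int} : Reach N i x → Reach N j y → Reach N (i + j) (x + y)
  | sub {i j : Nat} {x y : Int} : Reach N i x → Reach N j y → Reach N (i + j) (x - y)
  | mul {i j : Nat} {x y : Int} : Reach N i x → Reach N j y → Reach N (i + j) (x * y)
  | div {i j : Nat} {x y : Int} : Reach N i x → Reach N j y → y ≠ 0 →
      Reach N (i + j) (PySem.Int.floordiv x y)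

def OpRel (n1 n2 x : Int) : Prop :=
  x = n1 + n2 ∨ x = n1 - n2 ∨ x = n1 * n2 ∨ (n2 ≠ 0 ∧ x = PySem.Int.floordiv n1 n2)

theorem Reach_pos {N : Int} {c : Nat} {x : Int} (h : Reach N c x) : 1 ≤ c := by
  induction h <;> omega

theorem Reach_succ_iff (N : Int) (c : Nat) (x : Int) :
    Reach N (c + 1) x ↔ x = repNum N ((c : Int) + 1) ∨
      ∃ i : Nat, 1 ≤ i ∧ i ≤ c ∧
        ∃ n1 n2, Reach N i n1 ∧ Reach N (c + 1 - i) n2 ∧ OpRel n1 n2 x := by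
  constructor
  · intro h
    generalize hc : c + 1 = c' at h
    cases h with
    | rep _ h1 => left; rw [← hc]; push_cast; rfl
    | @add i j x y hx hy =>
      right
      have hi := Reach_pos hx; have hj := Reach_pos hy
      refine ⟨i, hi, by omega, x, y, hx, ?_, Or.inl rfl⟩
      simpa using hy
    | @sub i j x y hx hy =>
      right
      have hi := Reach_pos hx; have hj := Reach_pos hy
      refine ⟨i, hi, by omega, x, y, hx, ?_, Or.inr (Or.inl rfl)⟩
      simpa using hy
    | @mul i j x y hx hy =>
      right
      have hi := Reach_pos hx; have hj := Reach_pos hy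
      refine ⟨i, hi, by omega, x, y, hx, ?_, Or.inr (Or.inr (Or.inl rfl))⟩
      simpa using hy
    | @div i j x y hx hy hz =>
      right
      have hi := Reach_pos hx; have hj := Reach_pos hy
      refine ⟨i, hi, by omega, x, y, hx, ?_, Or.inr (Or.inr (Or.inr ⟨hz, rfl⟩))⟩
      simpa using hy
  · rintro (rfl | ⟨i, hi1, hic, n1, n2, h1, h2, hop⟩)
    · have := Reach.rep (N := N) (c + 1) (by omega)
      simpa using this
    · have hsum : i + (c + 1 - i) = c + 1 := by omega
      rcases hop with rfl | rfl | rfl | ⟨hz, rfl⟩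
      · exact hsum ▸ Reach.add h1 h2
      · exact hsum ▸ Reach.sub h1 h2
      · exact hsum ▸ Reach.mul h1 h2
      · exact hsum ▸ Reach.div h1 h2 hz

theorem mem_foldl_step {β : Type} (g : PvSet → β → PvSet)
    (P : β → Int → Prop)
    (hg : ∀ s b x, x ∈ (g s b).l ↔ x ∈ s.l ∨ P b x) :
    ∀ (l : List β) (s : PvSet) (x : Int),
      x ∈ (l.foldl g s).l ↔ x ∈ s.l ∨ ∃ b ∈ l, P b x := by
  intro l
  induction l with
  | nil => simp
  | cons b t ih =>
    intro s x
    simp only [List.foldl_cons, ih, hg, List.mem_cons]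
    constructor
    · rintro (( h | h) | ⟨b', hb', h⟩)
      · exact Or.inl h
      · exact Or.inr ⟨b, Or.inl rfl, h⟩
      · exact Or.inr ⟨b', Or.inr hb', h⟩
    · rintro (h | ⟨b', (rfl | hb'), h⟩)
      · exact Or.inl (Or.inl h)
      · exact Or.inl (Or.inr h)
      · exact Or.inr ⟨b', hb', h⟩

theorem mem_pvOps (s : PvSet) (n1 n2 x : Int) :
    x ∈ (pvOps s n1 n2).l ↔ x ∈ s.l ∨ OpRel n1 n2 x := by
  unfold pvOps OpRel
  split_ifs with h
  · simp only [PvSet.mem_add]; tauto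
  · simp only [PvSet.mem_add, not_not] at *
    constructor
    · rintro ((h1 | h1) | h1) <;> tauto
    · rintro (h1 | (h1 | h1 | h1 | ⟨h2, _⟩)) <;> tauto

theorem mem_pvNew (dp : List PvSet) (ans : Int) (x : Int) :
    x ∈ (pvNew dp ans).l ↔ ∃ i ∈ PySem.List.pyRange 1 ans 1,
      ∃ n1 ∈ (PySem.List.pyGetD dp i PvSet.empty).l,
        ∃ n2 ∈ (PySem.List.pyGetD dp (ans - i) PvSet.empty).l,
          OpRel n1 n2 x := by
  unfold pvNew
  rw [mem_foldl_step _
    (fun i x => ∃ n1 ∈ (PySem.List.pyGetD dp i PvSet.empty).l,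
       ∃ n2 ∈ (PySem.List.pyGetD dp (ans - i) PvSet.empty).l, OpRel n1 n2 x)
    (fun s i x => by
      rw [mem_foldl_step _
        (fun n1 x => ∃ n2 ∈ (PySem.List.pyGetD dp (ans - i) PvSet.empty).l, OpRel n1 n2 x)
        (fun s n1 x => by
          rw [mem_foldl_step _ (fun n2 x => OpRel n1 n2 x)
            (fun s n2 x => mem_pvOps s n1 n2 x)])])]
  simp [PvSet.mem_empty]

theorem length_pvLevels (N : Int) (c : Nat) : (pvLevels N c).length = c := by
  induction c with
  | zero => rfl
  | succ c ih => unfold pvLevels; simpa using ih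

-- B's level body, named so that pvLevels (c+1) is an append equation
def valsB (N : Int) (c : Nat) : PvSet :=
  (PySem.List.pyRange 1 ((c : Int) + 1) 1).foldl
    (fun vals i =>
      let a := PySem.List.pyGetD (pvLevels N c) (i - 1) PvSet.empty
      let b := PySem.List.pyGetD (pvLevels N c) (((c : Int) + 1) - i - 1) PvSet.empty
      let vals := PvSet.update vals (a.l.flatMap fun x => b.l.map (fun y => x + y))
      let vals := PvSet.update vals (a.l.flatMap fun x => b.l.map (fun y => x - y))
      let vals := PvSet.update vals (a.l.flatMap fun x => b.l.map (fun y => x * y))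
      PvSet.update vals
        (a.l.flatMap fun x =>
          (b.l.filter (fun y => y != 0)).map (fun y => PySem.Int.floordiv x y)))
    (PvSet.add PvSet.empty (repNum N ((c : Int) + 1)))

theorem pvLevels_succ (N : Int) (c : Nat) :
    pvLevels N (c + 1) = pvLevels N c ++ [valsB N c] := rfl

theorem mem_valsB_step (N : Int) (c : Nat) (s : PvSet) (i x : Int) :
    (x ∈ (let a := PySem.List.pyGetD (pvLevels N c) (i - 1) PvSet.empty
      let b := PySem.List.pyGetD (pvLevels N c) (((c : Int) + 1) - i - 1) PvSet.empty
      let vals := PvSet.update s (a.l.flatMap fun x => b.l.map (fun y => x + y))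
      let vals := PvSet.update vals (a.l.flatMap fun x => b.l.map (fun y => x - y))
      let vals := PvSet.update vals (a.l.flatMap fun x => b.l.map (fun y => x * y))
      PvSet.update vals
        (a.l.flatMap fun x =>
          (b.l.filter (fun y => y != 0)).map (fun y => PySem.Int.floordiv x y))).l) ↔
    x ∈ s.l ∨ ∃ n1 ∈ (PySem.List.pyGetD (pvLevels N c) (i - 1) PvSet.empty).l,
      ∃ n2 ∈ (PySem.List.pyGetD (pvLevels N c) (((c : Int) + 1) - i - 1) PvSet.empty).l,
        OpRel n1 n2 x := by
  simp only [PvSet.mem_update, List.mem_flatMap, List.mem_map, List.mem_filter,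
    bne_iff_ne, OpRel]
  constructor
  · rintro ((((h | ⟨n1, h1, n2, h2, rfl⟩) | ⟨n1, h1, n2, h2, rfl⟩) |
      ⟨n1, h1, n2, h2, rfl⟩) | ⟨n1, h1, n2, ⟨h2, hz⟩, rfl⟩)
    · exact Or.inl h
    · exact Or.inr ⟨n1, h1, n2, h2, Or.inl rfl⟩
    · exact Or.inr ⟨n1, h1, n2, h2, Or.inr (Or.inl rfl)⟩
    · exact Or.inr ⟨n1, h1, n2, h2, Or.inr (Or.inr (Or.inl rfl))⟩
    · exact Or.inr ⟨n1, h1, n2, h2, Or.inr (Or.inr (Or.inr ⟨hz, rfl⟩))⟩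
  · rintro (h | ⟨n1, h1, n2, h2, (rfl | rfl | rfl | ⟨hz, rfl⟩)⟩)
    · exact Or.inl (Or.inl (Or.inl (Or.inl h)))
    · exact Or.inl (Or.inl (Or.inl (Or.inr ⟨n1, h1, n2, h2, rfl⟩)))
    · exact Or.inl (Or.inl (Or.inr ⟨n1, h1, n2, h2, rfl⟩))
    · exact Or.inl (Or.inr ⟨n1, h1, n2, h2, rfl⟩)
    · exact Or.inr ⟨n1, h1, n2, ⟨h2, hz⟩, rfl⟩

theorem mem_pvLevels (N : Int) : ∀ (c k : Nat), k < c → ∀ (x : Int),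
    x ∈ ((pvLevels N c).getD k PvSet.empty).l ↔ Reach N (k + 1) x := by
  intro c
  induction c with
  | zero => omega
  | succ c ih =>
    intro k hk x
    have hlen : (pvLevels N c).length = c := length_pvLevels N c
    rw [pvLevels_succ]
    rcases Nat.lt_or_ge k c with hkc | hkc
    · rw [List.getD_append _ _ _ _ (by simpa [hlen] using hkc)]
      exact ih k hkc x
    · have hkeq : k = c := by omega
      subst hkeq
      rw [List.getD_append_right _ _ _ _ (by simp [hlen])]
      simp only [hlen, Nat.sub_self, List.getD_cons_zero]
      unfold valsB
      rw [mem_foldl_step _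
        (fun i x => ∃ n1 ∈ (PySem.List.pyGetD (pvLevels N k) (i - 1) PvSet.empty).l,
          ∃ n2 ∈ (PySem.List.pyGetD (pvLevels N k) (((k : Int) + 1) - i - 1) PvSet.empty).l,
            OpRel n1 n2 x)
        (fun s i x => mem_valsB_step N k s i x)]
      rw [Reach_succ_iff]
      simp only [PvSet.mem_add, PvSet.mem_empty, false_or, PySem.List.mem_pyRange_one]
      constructor
      · rintro (rfl | ⟨i, ⟨hi1, hi2⟩, n1, h1, n2, h2, hop⟩)
        · exact Or.inl rfl
        · right
          lift i to ℕ using (by omega) with iN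
          have hiN1 : 1 ≤ iN := by exact_mod_cast hi1
          have hiN2 : iN ≤ k := by omega
          refine ⟨iN, hiN1, hiN2, n1, n2, ?_, ?_, hop⟩
          · have heq : (iN : Int) - 1 = ((iN - 1 : Nat) : Int) := by omega
            rw [heq, PySem.List.pyGetD_natCast] at h1
            have := (ih (iN - 1) (by omega) n1).mp h1
            simpa [Nat.sub_add_cancel hiN1] using this
          · have heq : (k : Int) + 1 - iN - 1 = ((k - iN : Nat) : Int) := by omega
            rw [heq, PySem.List.pyGetD_natCast] at h2
            have := (ih (k - iN) (by omega) n2).mp h2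
            have heq2 : k - iN + 1 = k + 1 - iN := by omega
            rwa [heq2] at this
      · rintro (rfl | ⟨iN, hi1, hi2, n1, n2, hr1, hr2, hop⟩)
        · exact Or.inl rfl
        · right
          refine ⟨(iN : Int), ⟨by exact_mod_cast hi1, by omega⟩, n1, ?_, n2, ?_, hop⟩
          · have heq : (iN : Int) - 1 = ((iN - 1 : Nat) : Int) := by omega
            rw [heq, PySem.List.pyGetD_natCast]
            exact (ih (iN - 1) (by omega) n1).mpr (by simpa [Nat.sub_add_cancel hi1] using hr1)
          · have heq : (k : Int) + 1 - iN - 1 = ((k - iN : Nat) : Int) := by omega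
            rw [heq, PySem.List.pyGetD_natCast]
            refine (ih (k - iN) (by omega) n2).mpr ?_
            have heq2 : k - iN + 1 = k + 1 - iN := by omega
            rwa [heq2]

-- A's dp array state after the levels 2..p have been processed
def dpOK (N : Int) (p : Nat) (dp : List PvSet) : Prop :=
  dp.length = 9 ∧ ∀ k : Nat, 1 ≤ k → k ≤ 8 → ∀ x : Int,
    (x ∈ (PySem.List.pyGetD dp (k : Int) PvSet.empty).l ↔
      (if k ≤ p then Reach N k x else x = repNum N (k : Int)))

theorem foldl_init (N : Int) :
    ∀ (l : List Int) (init : List PvSet), init.length = 9 →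
      (∀ i ∈ l, 1 ≤ i ∧ i < 9) → l.Nodup →
      ((l.foldl (fun dp i => PySem.List.pySetD dp i
          (PvSet.add (PySem.List.pyGetD dp i PvSet.empty) (repNum N i)))
          init).length = 9 ∧
        ∀ k : Nat, k < 9 → (l.foldl (fun dp i => PySem.List.pySetD dp i
          (PvSet.add (PySem.List.pyGetD dp i PvSet.empty) (repNum N i)))
          init).getD k PvSet.empty =
          (if (k : Int) ∈ l then PvSet.add (init.getD k PvSet.empty) (repNum N (k : Int))
           else init.getD k PvSet.empty)) := by
  intro l
  induction l with
  | nil => intro init hlen _ _; exact ⟨hlen, fun k _ => by simp⟩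
  | cons i t ih =>
    intro init hlen hmem hnd
    have hi := hmem i (List.mem_cons_self ..)
    have hnd' := (List.nodup_cons.mp hnd).2
    have hint : i ∉ t := (List.nodup_cons.mp hnd).1
    have hset : PySem.List.pySetD init i
        (PvSet.add (PySem.List.pyGetD init i PvSet.empty) (repNum N i)) =
        init.set i.toNat (PvSet.add (PySem.List.pyGetD init i PvSet.empty) (repNum N i)) :=
      PySem.List.pySetD_of_nonneg _ _ (by omega)
    have hlen' : (init.set i.toNat
        (PvSet.add (PySem.List.pyGetD init i PvSet.empty) (repNum N i))).length = 9 := by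
      simpa using hlen
    simp only [List.foldl_cons, hset]
    obtain ⟨ihl, ihe⟩ := ih _ hlen' (fun j hj => hmem j (List.mem_cons_of_mem _ hj)) hnd'
    refine ⟨ihl, fun k hk => ?_⟩
    rw [ihe k hk]
    have hget : ∀ (k : Nat), k < 9 → (init.set i.toNat
        (PvSet.add (PySem.List.pyGetD init i PvSet.empty) (repNum N i))).getD k PvSet.empty =
        (if (k : Int) = i then PvSet.add (init.getD k PvSet.empty) (repNum N (k : Int))
         else init.getD k PvSet.empty) := by
      intro k hk
      have hget2 : PySem.List.pyGetD init i PvSet.empty = init.getD i.toNat PvSet.empty := by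
        rw [PySem.List.pyGetD_of_nonneg _ _ (by omega)]
      by_cases hik : (k : Int) = i
      · have h2 : i.toNat = k := by omega
        rw [if_pos hik, hget2, h2, ← hik]
        first
          | rfl
          | simp [List.getD, List.getElem?_set_self (show k < init.length by omega)]
      · have h2 : i.toNat ≠ k := by omega
        rw [if_neg hik]
        simp [List.getD, List.getElem?_set_ne h2]
    rw [hget k hk]
    simp only [List.mem_cons]
    by_cases hkt : (k : Int) ∈ t <;> by_cases hki : (k : Int) = i
    · exact absurd (by rwa [hki] at hkt) hint
    · simp [hki]
    · simp [hki]
      intro h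
      exact absurd h (by rwa [hki] at hkt)
    · simp [hkt, hki]

theorem init_dpOK (N : Int) :
    dpOK N 1 ((PySem.List.pyRange 1 9 1).foldl (fun dp i =>
      PySem.List.pySetD dp i
        (PvSet.add (PySem.List.pyGetD dp i PvSet.empty) (repNum N i)))
      ((PySem.List.pyRange 0 9 1).map (fun _ => PvSet.empty))) := by
  have h0 : ((PySem.List.pyRange 0 9 1).map (fun _ => PvSet.empty)) =
      [PvSet.empty, PvSet.empty, PvSet.empty, PvSet.empty, PvSet.empty, PvSet.empty,
       PvSet.empty, PvSet.empty, PvSet.empty] := by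
    rw [show PySem.List.pyRange 0 9 1 = [0,1,2,3,4,5,6,7,8] from by decide]
    rfl
  rw [h0]
  obtain ⟨hl, he⟩ := foldl_init N (PySem.List.pyRange 1 9 1)
    [PvSet.empty, PvSet.empty, PvSet.empty, PvSet.empty, PvSet.empty, PvSet.empty,
     PvSet.empty, PvSet.empty, PvSet.empty]
    rfl (fun i hi => by rw [PySem.List.mem_pyRange_one] at hi; omega)
    (PySem.List.nodup_pyRange_one 1 9)
  refine ⟨hl, ?_⟩
  intro k h1 h8 x
  rw [PySem.List.pyGetD_natCast]
  rw [he k (by omega)]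
  rw [if_pos (by rw [PySem.List.mem_pyRange_one]; omega)]
  have hempty : ([PvSet.empty, PvSet.empty, PvSet.empty, PvSet.empty, PvSet.empty,
      PvSet.empty, PvSet.empty, PvSet.empty, PvSet.empty] : List PvSet).getD k PvSet.empty =
      PvSet.empty := by
    interval_cases k <;> rfl
  rw [hempty]
  have hmem : x ∈ (PvSet.add PvSet.empty (repNum N (k : Int))).l ↔
      x = repNum N (k : Int) := by
    rw [PvSet.mem_add]
    simp [PvSet.mem_empty]
  rw [hmem]
  by_cases hk1 : k ≤ 1
  · have hke : k = 1 := by omega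
    subst hke
    rw [if_pos (le_refl 1)]
    constructor
    · intro h
      rw [show (1 : Nat) = 0 + 1 from rfl, Reach_succ_iff]
      left
      simpa using h
    · intro h
      rw [show (1 : Nat) = 0 + 1 from rfl, Reach_succ_iff] at h
      rcases h with h | ⟨i, hi1, hi0, _⟩
      · simpa using h
      · omega
  · rw [if_neg hk1]

-- membership in A's updated dp[ans] at ans = p+1 is exactly Reach at level p+1
theorem mem_updated (N : Int) (p : Nat) (dp : List PvSet)
    (hdp : dpOK N p dp) (hp1 : 1 ≤ p) (hp7 : p ≤ 7) (x : Int) :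
    x ∈ (PvSet.update (PySem.List.pyGetD dp ((p : Int) + 1) PvSet.empty)
        (pvNew dp ((p : Int) + 1)).l).l ↔ Reach N (p + 1) x := by
  obtain ⟨hlen, hchar⟩ := hdp
  rw [PvSet.mem_update, mem_pvNew, Reach_succ_iff]
  have hbase : x ∈ (PySem.List.pyGetD dp ((p : Int) + 1) PvSet.empty).l ↔
      x = repNum N ((p : Int) + 1) := by
    have hcast : ((p : Int) + 1) = ((p + 1 : Nat) : Int) := by push_cast; ring
    rw [hcast]
    rw [hchar (p + 1) (by omega) (by omega) x]
    simp [show ¬(p + 1 ≤ p) from by omega]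
  rw [hbase]
  constructor
  · rintro (rfl | ⟨i, hi, n1, h1, n2, h2, hop⟩)
    · exact Or.inl rfl
    · rw [PySem.List.mem_pyRange_one] at hi
      right
      lift i to ℕ using (by omega) with iN
      have hiN1 : 1 ≤ iN := by exact_mod_cast hi.1
      have hiN2 : iN ≤ p := by omega
      refine ⟨iN, hiN1, hiN2, n1, n2, ?_, ?_, hop⟩
      · have := (hchar iN (by omega) (by omega) n1).mp h1
        simpa [show iN ≤ p from hiN2] using this
      · have hcast : (p : Int) + 1 - iN = ((p + 1 - iN : Nat) : Int) := by omega
        rw [hcast] at h2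
        have := (hchar (p + 1 - iN) (by omega) (by omega) n2).mp h2
        simpa [show p + 1 - iN ≤ p from by omega] using this
  · rintro (rfl | ⟨iN, hi1, hi2, n1, n2, hr1, hr2, hop⟩)
    · exact Or.inl rfl
    · right
      refine ⟨(iN : Int), ?_, n1, ?_, n2, ?_, hop⟩
      · rw [PySem.List.mem_pyRange_one]; omega
      · rw [hchar iN (by omega) (by omega) n1]
        simpa [show iN ≤ p from hi2] using hr1
      · have hcast : (p : Int) + 1 - iN = ((p + 1 - iN : Nat) : Int) := by omega
        rw [hcast, hchar (p + 1 - iN) (by omega) (by omega) n2]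
        simpa [show p + 1 - iN ≤ p from by omega] using hr2

theorem loop_eq (N number : Int) :
    ∀ (n p : Nat) (dp : List PvSet), p + n = 8 → 1 ≤ p → dpOK N p dp →
      pvAnsLoop number (PySem.List.pyRange ((p : Int) + 1) 9 1) dp =
      pvScan number (pvLevels N 8) (PySem.List.pyRange ((p : Int) + 1) 9 1) := by
  intro n
  induction n with
  | zero =>
    intro p dp hp8 hp1 hdp
    rw [PySem.List.pyRange_one_eq_nil (by omega)]
    rfl
  | succ n ih =>
    intro p dp hp8 hp1 hdp
    have hp7 : p ≤ 7 := by omega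
    rw [PySem.List.pyRange_one_cons (by omega)]
    simp only [pvAnsLoop, pvScan]
    have hlen : dp.length = 9 := hdp.1
    have hcast : ((p : Int) + 1) = ((p + 1 : Nat) : Int) := by push_cast; ring
    -- A's updated entry at index p+1
    have hsetget : PySem.List.pyGetD
        (PySem.List.pySetD dp ((p : Int) + 1)
          (PvSet.update (PySem.List.pyGetD dp ((p : Int) + 1) PvSet.empty)
            (pvNew dp ((p : Int) + 1)).l)) ((p : Int) + 1) PvSet.empty =
        PvSet.update (PySem.List.pyGetD dp ((p : Int) + 1) PvSet.empty)
          (pvNew dp ((p : Int) + 1)).l := by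
      rw [hcast, PySem.List.pySetD_natCast, PySem.List.pyGetD_natCast]
      have : p + 1 < dp.length := by omega
      simp [List.getD, List.getElem?_set_self (by simpa using this)]
    have hA : ∀ x, x ∈ (PySem.List.pyGetD
        (PySem.List.pySetD dp ((p : Int) + 1)
          (PvSet.update (PySem.List.pyGetD dp ((p : Int) + 1) PvSet.empty)
            (pvNew dp ((p : Int) + 1)).l)) ((p : Int) + 1) PvSet.empty).l ↔
        Reach N (p + 1) x := by
      intro x; rw [hsetget]; exact mem_updated N p dp hdp hp1 hp7 x
    have hB : ∀ x, x ∈ (PySem.List.pyGetD (pvLevels N 8) ((p : Int) + 1 - 1) PvSet.empty).l ↔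
        Reach N (p + 1) x := by
      intro x
      have : ((p : Int) + 1 - 1) = ((p : Nat) : Int) := by omega
      rw [this, PySem.List.pyGetD_natCast]
      exact mem_pvLevels N 8 p (by omega) x
    have hcont : PvSet.contains (PySem.List.pyGetD
        (PySem.List.pySetD dp ((p : Int) + 1)
          (PvSet.update (PySem.List.pyGetD dp ((p : Int) + 1) PvSet.empty)
            (pvNew dp ((p : Int) + 1)).l)) ((p : Int) + 1) PvSet.empty) number =
        PvSet.contains (PySem.List.pyGetD (pvLevels N 8) ((p : Int) + 1 - 1) PvSet.empty)
          number := by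
      have hiff := (hA number).trans (hB number).symm
      rcases h : PvSet.contains (PySem.List.pyGetD (pvLevels N 8) ((p : Int) + 1 - 1)
          PvSet.empty) number with _ | _
      · rw [Bool.eq_false_iff]
        intro hc'
        rw [Bool.eq_false_iff] at h
        exact h ((PvSet.contains_iff _ _).mpr (hiff.mp ((PvSet.contains_iff _ _).mp hc')))
      · exact (PvSet.contains_iff _ _).mpr (hiff.mpr ((PvSet.contains_iff _ _).mp h))
    rw [hcont]
    rcases hc : PvSet.contains (PySem.List.pyGetD (pvLevels N 8) ((p : Int) + 1 - 1)
        PvSet.empty) number with _ | _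
    · simp only [Bool.false_eq_true, if_false]
      -- recurse with the invariant at p+1
      have hdp' : dpOK N (p + 1)
          (PySem.List.pySetD dp ((p : Int) + 1)
            (PvSet.update (PySem.List.pyGetD dp ((p : Int) + 1) PvSet.empty)
              (pvNew dp ((p : Int) + 1)).l)) := by
        constructor
        · rw [hcast, PySem.List.pySetD_natCast]; simpa using hlen
        · intro k h1 h8 x
          by_cases hkp : k = p + 1
          · subst hkp
            rw [← hcast, hA x]
            simp
          · have hgetne : PySem.List.pyGetD
                (PySem.List.pySetD dp ((p : Int) + 1)
                  (PvSet.update (PySem.List.pyGetD dp ((p : Int) + 1) PvSet.empty)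
                    (pvNew dp ((p : Int) + 1)).l)) ((k : Nat) : Int) PvSet.empty =
                PySem.List.pyGetD dp ((k : Nat) : Int) PvSet.empty := by
              rw [hcast, PySem.List.pySetD_natCast, PySem.List.pyGetD_natCast,
                PySem.List.pyGetD_natCast]
              simp [List.getD, List.getElem?_set_ne (by omega : p + 1 ≠ k)]
            rw [hgetne, hdp.2 k h1 h8 x]
            rcases Nat.lt_or_ge p k with hlt | hge
            · simp [show ¬ (k ≤ p) from by omega, show ¬ (k ≤ p + 1) from by omega]
            · simp [show k ≤ p from hge, show k ≤ p + 1 from by omega]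
      have := ih (p + 1) _ (by omega) (by omega) hdp'
      have hcast2 : ((p : Int) + 1 + 1) = (((p + 1 : Nat) : Int) + 1) := by push_cast; ring
      rw [hcast2]
      exact this
    · simp only [if_true]

-- ===== VERDICT (by name: the statement is the Claim_ definition above) =====
theorem solution_spec : Claim_equal_solution := by
  intro N number _hdom _hpre
  unfold Spec_solution solution solution_alt
  by_cases h : (N == number) = true
  · simp [h]
  · simp only [h, if_false, Bool.false_eq_true]
    have := loop_eq N number 7 1 _ (by omega) (by omega) (init_dpOK N)
    simpa using this
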